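-- pv_equiv track=rewrite | github.com/Juwei-Wang/Small-Games | Assignments/Assignment5/juweimodule.py | get_the_falling_elimination_index_2
-- ===== SOURCE A (Python) =====
-- def get_the_falling_elimination_index_2(game_array):
--     index_together = []
--     for i in range(len(game_array[0])):
--         current_number = -1
--         count = 1
--         index = []
--         for k in range(len(game_array)):
--             if k == 0:
--                 current_number = game_array[k][i]
--                 index.append([k, i])
--             if k >= 1:
--                 if game_array[k][i] == current_number:
--                     count += 1
--                     index.append([k, i])
--                 else:
--                     current_number = game_array[k][i]
--                     count = 1
--                     index = []
--                     index.append([k, i])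
--             if count == 3:
--                 useful = True
--                 index_together = index_together + index
--             if count >= 4:
--                 index_together = index_together + [index[len(index) - 1]]
--     return index_together
-- ===== SOURCE B (Python) =====
-- def get_the_falling_elimination_index_2(game_array):
--     result = []
--     for col in range(len(game_array[0])):
--         column = [row[col] for row in game_array]
--         start = 0
--         while start < len(column):
--             end = start + 1
--             while end < len(column) and column[end] == column[start]:
--                 end += 1
--             if end - start >= 3:
--                 for r in range(start, end):
--                     result.append([r, col])
--             start = end
--     return result
-- ===== Notes on version B (the rewrite author's own statement) =====
-- stated objective: simpler
-- what changed: B scans each column by detecting maximal runs of equal consecutive cells and emitting every run of length >= 3 at once (appending to the result), instead of A's per-row counter with separate count==3 full-flush and count>=4 last-element-flush steps.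
-- outside the precondition, e.g. on get_the_falling_elimination_index_2([]): A raises IndexError, B raises IndexError
import Mathlib
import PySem

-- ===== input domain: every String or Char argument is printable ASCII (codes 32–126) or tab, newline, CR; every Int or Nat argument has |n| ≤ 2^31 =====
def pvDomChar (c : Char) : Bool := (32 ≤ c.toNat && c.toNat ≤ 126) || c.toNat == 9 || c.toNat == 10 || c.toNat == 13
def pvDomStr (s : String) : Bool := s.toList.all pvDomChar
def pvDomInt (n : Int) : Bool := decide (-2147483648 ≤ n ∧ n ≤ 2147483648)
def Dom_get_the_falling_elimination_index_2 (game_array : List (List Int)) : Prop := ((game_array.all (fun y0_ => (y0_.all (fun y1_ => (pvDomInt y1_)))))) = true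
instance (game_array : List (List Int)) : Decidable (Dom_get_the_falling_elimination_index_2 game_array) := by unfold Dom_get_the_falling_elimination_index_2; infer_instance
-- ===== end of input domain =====

-- B replaces A's incremental count==3 / count>=4 flushing with a per-column maximal-run scan
-- that emits every run of length >= 3 at once (objective: simpler decomposition, same cost).

-- ===== PORT A =====
-- loop state: (current_number, count, index, index_together)
abbrev PVS : Type := Int × Int × List (List Int) × List (List Int)

-- body of A's inner `for k in range(len(game_array))` loop, transliterated branch by branch
def pvStepA (game_array : List (List Int)) (i : Int) (s : PVS) (k : Int) : PVS :=
  let v := PySem.List.pyGetD (PySem.List.pyGetD game_array k []) i 0   -- game_array[k][i]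
  let s1 := if k == 0 then (v, s.2.1, s.2.2.1 ++ [[k, i]], s.2.2.2) else s
  let s2 := if k ≥ 1 then
      (if v == s1.1 then (s1.1, s1.2.1 + 1, s1.2.2.1 ++ [[k, i]], s1.2.2.2)
       else (v, 1, [[k, i]], s1.2.2.2))
    else s1
  let s3 := if s2.2.1 == 3 then (s2.1, s2.2.1, s2.2.2.1, s2.2.2.2 ++ s2.2.2.1) else s2
  if s2.2.1 ≥ 4 then
    (s3.1, s3.2.1, s3.2.2.1,
     s3.2.2.2 ++ [PySem.List.pyGetD s3.2.2.1 (PySem.List.len s3.2.2.1 - 1) []])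
  else s3

def get_the_falling_elimination_index_2 (game_array : List (List Int)) : List (List Int) :=
  (PySem.List.pyRange 0 (PySem.List.len ((PySem.List.pyGet? game_array 0).getD [])) 1).foldl
    (fun (index_together : List (List Int)) (i : Int) =>
      ((PySem.List.pyRange 0 (PySem.List.len game_array) 1).foldl
        (pvStepA game_array i) (-1, 1, [], index_together)).2.2.2)
    []

-- ===== PORT B =====
def pvRunLen (v : Int) : List Int → Nat
  | [] => 0
  | x :: xs => if x = v then pvRunLen v xs + 1 else 0

-- Source B's while loop: take the maximal run at `start`, emit it if long enough, continue after it
def pvScanCol (i : Int) : Nat → List Int → List (List Int)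
  | _, [] => []
  | start, v :: rest =>
    let m := pvRunLen v rest
    (if 3 ≤ m + 1 then (List.range (m + 1)).map (fun t => [((start + t : Nat) : Int), i]) else [])
      ++ pvScanCol i (start + m + 1) (rest.drop m)
  termination_by _ xs => xs.length
  decreasing_by simp

def get_the_falling_elimination_index_2_alt (game_array : List (List Int)) : List (List Int) :=
  (PySem.List.pyRange 0 (PySem.List.len ((PySem.List.pyGet? game_array 0).getD [])) 1).foldl
    (fun (result : List (List Int)) (i : Int) =>
      let column := game_array.map (fun row => PySem.List.pyGetD row i 0)
      result ++ pvScanCol i 0 column)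
    []

-- ===== PRECONDITION & SPEC =====
-- Python A raises IndexError on [] (game_array[0]) and on ragged grids with a row shorter than
-- row 0 (game_array[k][i]); B raises there too, so those inputs are excluded.
def Pre_get_the_falling_elimination_index_2 (game_array : List (List Int)) : Prop :=
  game_array ≠ [] ∧ ∀ row ∈ game_array, (game_array.headD []).length ≤ row.length
instance (game_array : List (List Int)) : Decidable (Pre_get_the_falling_elimination_index_2 game_array) := by unfold Pre_get_the_falling_elimination_index_2; infer_instance

def pvWitness_get_the_falling_elimination_index_2 : List (List Int) := [[1, 2], [1, 5], [1, 5]]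

def Spec_get_the_falling_elimination_index_2 (game_array : List (List Int)) (out : List (List Int)) : Prop := out = get_the_falling_elimination_index_2_alt game_array
instance (game_array : List (List Int)) (out : List (List Int)) : Decidable (Spec_get_the_falling_elimination_index_2 game_array out) := by unfold Spec_get_the_falling_elimination_index_2; infer_instance

-- ===== CLAIM (what is proved, stated in full; the proofs are below) =====
def Claim_equal_get_the_falling_elimination_index_2 : Prop := ∀ (game_array : List (List Int)), Dom_get_the_falling_elimination_index_2 game_array → Pre_get_the_falling_elimination_index_2 game_array → Spec_get_the_falling_elimination_index_2 game_array (get_the_falling_elimination_index_2 game_array)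

-- ===== LEMMAS AND PROOFS =====

-- A's inner step with the row value handed over and the row index as a Nat
def pvStepV (i : Int) (s : PVS) (j : Nat) (v : Int) : PVS :=
  let s1 := if j == 0 then (v, s.2.1, s.2.2.1 ++ [[(j : Int), i]], s.2.2.2) else s
  let s2 := if 1 ≤ j then
      (if v == s1.1 then (s1.1, s1.2.1 + 1, s1.2.2.1 ++ [[(j : Int), i]], s1.2.2.2)
       else (v, 1, [[(j : Int), i]], s1.2.2.2))
    else s1
  let s3 := if s2.2.1 == 3 then (s2.1, s2.2.1, s2.2.2.1, s2.2.2.2 ++ s2.2.2.1) else s2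
  if s2.2.1 ≥ 4 then
    (s3.1, s3.2.1, s3.2.2.1,
     s3.2.2.2 ++ [PySem.List.pyGetD s3.2.2.1 (PySem.List.len s3.2.2.1 - 1) []])
  else s3

def pvFoldCol (i : Int) : Nat → List Int → PVS → PVS
  | _, [], s => s
  | j, v :: vs, s => pvFoldCol i (j + 1) vs (pvStepV i s j v)

-- the index list A keeps for the current run: rows s, s+1, …, s+c-1 of column i
def pvRunIdx (i : Int) (s c : Nat) : List (List Int) :=
  (List.range c).map (fun t => [((s + t : Nat) : Int), i])

-- what A's flushes will emit on the rest of the column, given run value v, length-so-far c, start s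
def pvFutEm (i : Int) : Int → Nat → Nat → List Int → List (List Int)
  | _, _, _, [] => []
  | v, c, s, x :: xs =>
    if x = v then
      (if c + 1 = 3 then pvRunIdx i s 3
       else if 4 ≤ c + 1 then [[((s + c : Nat) : Int), i]] else [])
        ++ pvFutEm i v (c + 1) s xs
    else pvFutEm i x 1 (s + c) xs

theorem pvStepAV (g : List (List Int)) (i : Int) (s : PVS) (j : Nat) :
    pvStepA g i s (j : Int) = pvStepV i s j (PySem.List.pyGetD (g.getD j []) i 0) := by
  simp [pvStepA, pvStepV, PySem.List.pyGetD_natCast, Nat.one_le_cast]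

theorem pvBridge (g : List (List Int)) (i : Int) :
    ∀ (n j : Nat) (s : PVS), j + n = g.length →
    List.foldl (fun s (k : Nat) => pvStepA g i s ((0 : Int) + k)) s (List.range' j n) =
      pvFoldCol i j ((g.drop j).map (fun row => PySem.List.pyGetD row i 0)) s := by
  intro n
  induction n with
  | zero =>
    intro j s h
    simp [List.drop_of_length_le (by omega : g.length ≤ j), pvFoldCol]
  | succ n ih =>
    intro j s h
    have hj : j < g.length := by omega
    rw [List.range'_succ, List.foldl_cons, ih (j + 1) _ (by omega),
        List.drop_eq_getElem_cons hj, List.map_cons, pvFoldCol,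
        zero_add, pvStepAV, List.getD_eq_getElem g [] hj]

theorem pvRunIdx_succ (i : Int) (s c : Nat) :
    pvRunIdx i s c ++ [[((s + c : Nat) : Int), i]] = pvRunIdx i s (c + 1) := by
  simp [pvRunIdx, List.range_succ]

theorem pvStepV_run (i v x : Int) (s c : Nat) (acc : List (List Int)) (h1 : 1 ≤ c) :
    pvStepV i (v, (c : Int), pvRunIdx i s c, acc) (s + c) x =
      (if x = v then
        (v, ((c + 1 : Nat) : Int), pvRunIdx i s (c + 1),
          acc ++ (if c + 1 = 3 then pvRunIdx i s 3
                  else if 4 ≤ c + 1 then [[((s + c : Nat) : Int), i]] else []))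
       else (x, (1 : Int), pvRunIdx i (s + c) 1, acc)) := by
  have h0 : ((s + c : Nat) == 0) = false := by simp; omega
  by_cases hx : x = v
  · subst hx
    by_cases h2 : c = 2
    · subst h2
      simp [pvStepV, h0, (show 1 ≤ s + 2 by omega), ← pvRunIdx_succ]
    · by_cases h3 : 3 ≤ c
      · simp [pvStepV, h0, (show 1 ≤ s + c by omega), ← pvRunIdx_succ,
              (show ¬((c : Int) + 1 = 3) by omega), (show (4 : Int) ≤ (c : Int) + 1 by omega)]
        rw [if_neg h2, if_pos h3]
      · have hc1 : c = 1 := by omega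
        subst hc1
        simp [pvStepV, h0, (show 1 ≤ s + 1 by omega), ← pvRunIdx_succ]
  · simp [pvStepV, h0, hx, (show 1 ≤ s + c by omega), pvRunIdx]

theorem pvInvariant (i : Int) :
    ∀ (xs : List Int) (s c : Nat) (v : Int) (acc : List (List Int)), 1 ≤ c →
    (pvFoldCol i (s + c) xs (v, (c : Int), pvRunIdx i s c, acc)).2.2.2 =
      acc ++ pvFutEm i v c s xs := by
  intro xs
  induction xs with
  | nil => intro s c v acc h; simp [pvFoldCol, pvFutEm]
  | cons x xs ih =>
    intro s c v acc h
    rw [pvFoldCol, pvStepV_run i v x s c acc h, pvFutEm]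
    by_cases hx : x = v
    · rw [if_pos hx, if_pos hx]
      have := ih s (c + 1) v
        (acc ++ (if c + 1 = 3 then pvRunIdx i s 3
                 else if 4 ≤ c + 1 then [[((s + c : Nat) : Int), i]] else [])) (by omega)
      rw [show s + c + 1 = s + (c + 1) by omega] at *
      rw [this, List.append_assoc]
    · rw [if_neg hx, if_neg hx]
      have := ih (s + c) 1 x acc (by omega)
      rw [show s + c + 1 = s + c + 1 by omega] at this
      exact this

theorem pvFutEm_eq (i : Int) :
    ∀ (xs : List Int) (v : Int) (c s : Nat), 1 ≤ c →
    pvFutEm i v c s xs =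
      (if 3 ≤ c + pvRunLen v xs then (pvRunIdx i s (c + pvRunLen v xs)).drop (if 3 ≤ c then c else 0) else [])
        ++ pvScanCol i (s + c + pvRunLen v xs) (xs.drop (pvRunLen v xs)) := by
  intro xs
  induction xs with
  | nil =>
    intro v c s h
    by_cases h3 : 3 ≤ c
    · simp [pvFutEm, pvScanCol, pvRunLen, h3,
        List.drop_of_length_le (show (pvRunIdx i s c).length ≤ c by simp [pvRunIdx])]
    · simp [pvFutEm, pvScanCol, pvRunLen, h3]
  | cons x xs ih =>
    intro v c s h
    by_cases hx : x = v
    · rw [pvFutEm, if_pos hx, ih v (c + 1) s (by omega),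
          show pvRunLen v (x :: xs) = pvRunLen v xs + 1 by simp [pvRunLen, hx],
          List.drop_succ_cons,
          show s + (c + 1) + pvRunLen v xs = s + c + (pvRunLen v xs + 1) by omega,
          show c + 1 + pvRunLen v xs = c + (pvRunLen v xs + 1) by omega,
          ← List.append_assoc]
      congr 1
      by_cases h2 : c = 2
      · subst h2
        rw [if_pos rfl, if_pos (by omega), if_pos (by omega : 3 ≤ 2 + (pvRunLen v xs + 1)),
            if_neg (by omega : ¬ (3 : Nat) ≤ 2), List.drop_zero,
            show 2 + (pvRunLen v xs + 1) = 3 + pvRunLen v xs by omega]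
        conv_rhs => rw [← List.take_append_drop 3 (pvRunIdx i s (3 + pvRunLen v xs))]
        congr 1
        simp [pvRunIdx, ← List.map_take, List.take_range]
      · by_cases h3 : 3 ≤ c
        · rw [if_neg (by omega : ¬ c + 1 = 3), if_pos (by omega : 4 ≤ c + 1),
              if_pos (by omega), if_pos (by omega : 3 ≤ c + (pvRunLen v xs + 1)), if_pos h3]
          have hc : c < (pvRunIdx i s (c + (pvRunLen v xs + 1))).length := by
            simp [pvRunIdx]
          rw [List.drop_eq_getElem_cons hc]
          simp [pvRunIdx]
          split <;> omega
        · have hc1 : c = 1 := by omega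
          subst hc1
          rw [if_neg (by omega : ¬ 1 + 1 = 3), if_neg (by omega : ¬ 4 ≤ 1 + 1),
              if_neg (by omega : ¬ 3 ≤ 1 + 1), if_neg (by omega : ¬ 3 ≤ 1)]
          simp
    · rw [pvFutEm, if_neg hx, ih x 1 (s + c) (le_refl 1),
          show pvRunLen v (x :: xs) = 0 by simp [pvRunLen, hx]]
      simp only [Nat.add_zero, List.drop_zero]
      rw [pvScanCol, if_neg (by omega : ¬ (3 : Nat) ≤ 1), List.drop_zero,
          show s + c + 1 + pvRunLen x xs = s + c + pvRunLen x xs + 1 by omega,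
          show (1 : Nat) + pvRunLen x xs = pvRunLen x xs + 1 by omega]
      simp [pvRunIdx]
      intro h3
      rw [if_pos h3]

theorem pvColumn (i : Int) (col : List Int) (acc : List (List Int)) :
    (pvFoldCol i 0 col (-1, 1, [], acc)).2.2.2 = acc ++ pvScanCol i 0 col := by
  cases col with
  | nil => simp [pvFoldCol, pvScanCol]
  | cons v vs =>
    rw [pvFoldCol,
        show pvStepV i (-1, 1, [], acc) 0 v = (v, (1 : Int), pvRunIdx i 0 1, acc) by
          simp [pvStepV, pvRunIdx],
        show (0 : Nat) + 1 = 0 + 1 from rfl]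
    have hinv := pvInvariant i vs 0 1 v acc (le_refl 1)
    rw [Nat.cast_one] at hinv
    rw [hinv]
    congr 1
    rw [pvFutEm_eq i vs v 1 0 (le_refl 1), pvScanCol,
        if_neg (by omega : ¬ (3 : Nat) ≤ 1), List.drop_zero,
        show (1 : Nat) + pvRunLen v vs = pvRunLen v vs + 1 by omega]
    simp [pvRunIdx]

-- ===== VERDICT (by name: the statement is the Claim_ definition above) =====
theorem get_the_falling_elimination_index_2_spec : Claim_equal_get_the_falling_elimination_index_2 := by
  intro g _ _
  unfold Spec_get_the_falling_elimination_index_2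
  unfold get_the_falling_elimination_index_2 get_the_falling_elimination_index_2_alt
  congr 1
  funext acc i
  show ((PySem.List.pyRange 0 (PySem.List.len g) 1).foldl (pvStepA g i) (-1, 1, [], acc)).2.2.2
      = acc ++ pvScanCol i 0 (g.map (fun row => PySem.List.pyGetD row i 0))
  rw [PySem.List.pyRange_one]
  simp only [PySem.List.len_eq, sub_zero, Int.toNat_natCast]
  rw [List.range_eq_range', List.foldl_map,
      pvBridge g i g.length 0 _ (by omega), List.drop_zero, pvColumn]
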